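-- pv_equiv track=rewrite | github.com/Xylobyte/cse107-lab4 | statistics107.py | every_other_odd
-- ===== SOURCE A (Python) =====
-- def every_other_odd(elements):
--     """This function returns every other odd element in the given list.
--
--     elements: the list to process
--     """
--     lst = []
--     count = 0
--     for e in elements:
--         if e % 2 == 1:
--             if count % 2 == 0:
--                 lst.append(e)
--             count += 1
--     return lst
-- ===== SOURCE B (Python) =====
-- def every_other_odd(elements):
--     """This function returns every other odd element in the given list.
--
--     elements: the list to process
--     """
--     odds = [e for e in elements if e % 2 == 1]
--     return odds[::2]
-- ===== Notes on version B (the rewrite author's own statement) =====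
-- stated objective: simpler
-- what changed: Replaces the interleaved loop with its running parity counter by a filter building the list of odd elements followed by an every-other slice odds[::2].
import Mathlib
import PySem

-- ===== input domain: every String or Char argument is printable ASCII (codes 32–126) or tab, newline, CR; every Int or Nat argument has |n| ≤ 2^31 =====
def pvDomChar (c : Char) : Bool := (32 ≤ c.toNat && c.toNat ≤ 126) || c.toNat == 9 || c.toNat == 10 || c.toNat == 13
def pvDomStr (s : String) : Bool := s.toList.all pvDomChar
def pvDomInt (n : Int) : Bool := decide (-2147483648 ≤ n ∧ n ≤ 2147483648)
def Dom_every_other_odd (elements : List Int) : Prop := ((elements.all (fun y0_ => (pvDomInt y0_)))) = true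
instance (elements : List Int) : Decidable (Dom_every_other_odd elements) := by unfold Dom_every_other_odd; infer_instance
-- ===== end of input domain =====

-- B replaces A's single pass with a running parity counter by a filter pass
-- collecting the odd elements followed by an every-other slice odds[::2].

-- ===== PORT A =====
-- for e in elements: if e % 2 == 1: (if count % 2 == 0: lst.append(e)); count += 1
def every_other_odd (elements : List Int) : List Int :=
  (elements.foldl
    (fun (st : List Int × Int) e =>
      if PySem.Int.mod e 2 == 1 then
        ((if PySem.Int.mod st.2 2 == 0 then st.1 ++ [e] else st.1), st.2 + 1)
      else st)
    (([] : List Int), (0 : Int))).1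

-- ===== PORT B =====
-- odds = [e for e in elements if e % 2 == 1]; return odds[::2]
def every_other_odd_alt (elements : List Int) : List Int :=
  (PySem.List.slice? (elements.filter (fun e => PySem.Int.mod e 2 == 1)) none none 2).getD []

-- ===== PRECONDITION & SPEC =====
def Spec_every_other_odd (elements : List Int) (out : List Int) : Prop := out = every_other_odd_alt elements
instance (elements : List Int) (out : List Int) : Decidable (Spec_every_other_odd elements out) := by unfold Spec_every_other_odd; infer_instance

-- ===== CLAIM (what is proved, stated in full; the proofs are below) =====
def Claim_equal_every_other_odd : Prop := ∀ (elements : List Int), Dom_every_other_odd elements → Spec_every_other_odd elements (every_other_odd elements)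

-- ===== LEMMAS AND PROOFS =====

-- every other element of a list, with a flag saying whether the head is taken
def pvEO : Bool → List Int → List Int
  | _, [] => []
  | true, x :: r => x :: pvEO false r
  | false, _ :: r => pvEO true r

-- two-at-a-time recursion used only to drive inductions
def pvEO2 : List Int → List Int
  | [] => []
  | [x] => [x]
  | x :: _ :: r => x :: pvEO2 r

theorem pvEO_true_eq (xs : List Int) : pvEO true xs = pvEO2 xs := by
  induction xs using pvEO2.induct with
  | case1 => rfl
  | case2 x => rfl
  | case3 x y r ih => simp [pvEO, pvEO2, ih]

-- slice with step 2 as a filterMap over even indices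
theorem pv_slice_two (xs : List Int) : PySem.List.slice? xs none none 2 =
    some (List.filterMap (fun k : Nat => xs[2*k]?) (List.range ((xs.length + 1) / 2))) := by
  simp [PySem.List.slice?, PySem.List.sliceIndices]
  have h1 : (if 0 < xs.length then (((xs.length : Int) + 2 - 1) / 2).toNat else 0)
      = (xs.length + 1) / 2 := by split <;> omega
  rw [h1]
  apply List.filterMap_congr
  intro k _
  congr 1

theorem pv_fm_eo (xs : List Int) :
    List.filterMap (fun k : Nat => xs[2*k]?) (List.range ((xs.length + 1) / 2)) = pvEO2 xs := by
  induction xs using pvEO2.induct with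
  | case1 => simp [pvEO2]
  | case2 x => simp [pvEO2, List.range_succ]
  | case3 x y r ih =>
    have hlen : ((x :: y :: r).length + 1) / 2 = (r.length + 1) / 2 + 1 := by
      simp; omega
    rw [hlen, List.range_succ_eq_map, List.filterMap_cons, List.filterMap_map]
    simp only [Nat.mul_zero, List.getElem?_cons_zero, pvEO2]
    congr 1

theorem pv_fmod_two (c : Int) : c.fmod 2 = c % 2 := by
  rw [Int.fmod_eq_emod]
  simp

theorem pv_mod_flip (c : Int) :
    (PySem.Int.mod (c + 1) 2 == 0) = !(PySem.Int.mod c 2 == 0) := by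
  simp only [PySem.Int.mod, pv_fmod_two]
  rcases Int.emod_two_eq c with h | h
  · have h2 : (c + 1) % 2 = 1 := by omega
    rw [h, h2]; rfl
  · have h2 : (c + 1) % 2 = 0 := by omega
    rw [h, h2]; rfl

-- loop invariant of A's fold: result = acc ++ every-other of the odd elements,
-- starting with "take" iff count is even
theorem pv_foldA (xs : List Int) : ∀ (acc : List Int) (c : Int),
    (xs.foldl
      (fun (st : List Int × Int) e =>
        if PySem.Int.mod e 2 == 1 then
          ((if PySem.Int.mod st.2 2 == 0 then st.1 ++ [e] else st.1), st.2 + 1)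
        else st)
      (acc, c)).1
    = acc ++ pvEO (PySem.Int.mod c 2 == 0) (xs.filter (fun e => PySem.Int.mod e 2 == 1)) := by
  induction xs with
  | nil => intro acc c; simp [pvEO]
  | cons e r ih =>
    intro acc c
    by_cases he : (PySem.Int.mod e 2 == 1) = true
    · rw [List.foldl_cons]
      simp only [he, if_true]
      by_cases hc : (PySem.Int.mod c 2 == 0) = true
      · simp only [hc, if_true]
        rw [ih, pv_mod_flip, hc, List.filter_cons]
        simp only [he, if_true, Bool.not_true, pvEO, List.append_assoc,
          List.singleton_append]
      · rw [Bool.not_eq_true] at hc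
        simp only [hc, Bool.false_eq_true, if_false]
        rw [ih, pv_mod_flip, hc, List.filter_cons]
        simp only [he, if_true, Bool.not_false, pvEO]
    · rw [List.foldl_cons]
      simp only [Bool.not_eq_true] at he
      simp only [he, Bool.false_eq_true, if_false, List.filter_cons]
      exact ih acc c

-- ===== VERDICT (by name: the statement is the Claim_ definition above) =====
theorem every_other_odd_spec : Claim_equal_every_other_odd := by
  intro elements _
  unfold Spec_every_other_odd every_other_odd every_other_odd_alt
  rw [pv_foldA, pv_slice_two, pv_fm_eo]
  have h0 : (PySem.Int.mod 0 2 == 0) = true := by rfl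
  rw [h0, pvEO_true_eq]
  simp
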